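-- pv_equiv track=rewrite | github.com/jonwithnoh/ToxicComments | tca.py | repeated_char_remover
-- ===== SOURCE A (Python) =====
-- def repeated_char_remover(docs, num_chars=2):
-- 	cleandocs = []
-- 	for doc in docs:
-- 		cleandoc = []
-- 		for i, c in enumerate(doc):
-- 			if i >= num_chars:
-- 				same = True
-- 				for n in range(1,num_chars+1):
-- 					if not (doc[i] == doc[i-n]):
-- 						same = False
-- 						break
-- 				if not same:
-- 					cleandoc.append(c)
-- 			else:
-- 				cleandoc.append(c)
-- 		cleandocs.append(''.join(cleandoc))
-- 	return cleandocs
-- ===== SOURCE B (Python) =====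
-- def repeated_char_remover(docs, num_chars=2):
--     cleandocs = []
--     for doc in docs:
--         cleandoc = []
--         prev = None
--         run = 0
--         for c in doc:
--             run = run + 1 if c == prev else 1
--             prev = c
--             if run <= num_chars:
--                 cleandoc.append(c)
--         cleandocs.append(''.join(cleandoc))
--     return cleandocs
-- ===== Notes on version B (the rewrite author's own statement) =====
-- stated objective: simpler
-- what changed: Replaced A's per-character backward window scan (re-checking the previous num_chars characters at every position, with indexing) with a single forward pass that maintains an incremental run-length counter and keeps a character iff its run length stays at most num_chars.
import Mathlib
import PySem

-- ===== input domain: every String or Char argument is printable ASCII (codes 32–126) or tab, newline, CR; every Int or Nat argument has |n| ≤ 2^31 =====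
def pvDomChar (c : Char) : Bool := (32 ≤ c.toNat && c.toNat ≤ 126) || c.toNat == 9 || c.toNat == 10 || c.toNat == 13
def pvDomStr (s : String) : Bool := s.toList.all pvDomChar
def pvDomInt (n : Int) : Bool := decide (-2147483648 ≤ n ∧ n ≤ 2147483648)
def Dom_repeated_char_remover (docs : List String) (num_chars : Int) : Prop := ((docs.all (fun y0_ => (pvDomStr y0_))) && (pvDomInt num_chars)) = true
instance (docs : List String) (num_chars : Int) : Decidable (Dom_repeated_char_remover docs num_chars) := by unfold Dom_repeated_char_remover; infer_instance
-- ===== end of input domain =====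

-- B replaces A's backward window scan (for each position, re-check the previous
-- num_chars characters) by a single forward pass with an incremental run-length
-- counter; objective: simpler (one pass, no inner loop, no indexing).

-- ===== PORT A =====
-- inner 'for n in range(1, num_chars+1): if not (doc[i] == doc[i-n]): same = False; break'
def pvSameLoop (doc : List Char) (i : Int) : List Int → Bool
  | [] => true
  | n :: ns =>
    if !(PySem.List.pyGet? doc i == PySem.List.pyGet? doc (i - n)) then false
    else pvSameLoop doc i ns

-- body of the outer 'for i, c in enumerate(doc)'
def pvCleanA (doc : List Char) (num_chars : Int) : List Char :=
  (PySem.List.enumerate doc).foldl (fun cleandoc ic =>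
    if ic.1 ≥ num_chars then
      if pvSameLoop doc ic.1 (PySem.List.pyRange 1 (num_chars + 1) 1) then cleandoc
      else cleandoc ++ [ic.2]
    else cleandoc ++ [ic.2]) []

def repeated_char_remover (docs : List String) (num_chars : Int) : List String :=
  docs.foldl (fun cleandocs doc => cleandocs ++ [String.ofList (pvCleanA doc.toList num_chars)]) []

-- ===== PORT B =====
-- state (cleandoc, prev, run); 'run = run + 1 if c == prev else 1'
def pvStepB (num_chars : Int) (st : List Char × Option Char × Int) (c : Char) :
    List Char × Option Char × Int :=
  let run := if some c == st.2.1 then st.2.2 + 1 else 1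
  ((if run ≤ num_chars then st.1 ++ [c] else st.1), some c, run)

def pvCleanB (doc : List Char) (num_chars : Int) : List Char :=
  (doc.foldl (pvStepB num_chars) ([], none, 0)).1

def repeated_char_remover_alt (docs : List String) (num_chars : Int) : List String :=
  docs.foldl (fun cleandocs doc => cleandocs ++ [String.ofList (pvCleanB doc.toList num_chars)]) []

-- ===== PRECONDITION & SPEC =====
def Spec_repeated_char_remover (docs : List String) (num_chars : Int) (out : List String) : Prop := out = repeated_char_remover_alt docs num_chars
instance (docs : List String) (num_chars : Int) (out : List String) : Decidable (Spec_repeated_char_remover docs num_chars out) := by unfold Spec_repeated_char_remover; infer_instance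

-- ===== CLAIM (what is proved, stated in full; the proofs are below) =====
def Claim_equal_repeated_char_remover : Prop := ∀ (docs : List String) (num_chars : Int), Dom_repeated_char_remover docs num_chars → Spec_repeated_char_remover docs num_chars (repeated_char_remover docs num_chars)

-- ===== LEMMAS AND PROOFS =====

-- number of trailing occurrences of c in p
def pvTrail (c : Char) (p : List Char) : Nat :=
  (p.reverse.takeWhile (fun x => x == c)).length

-- common intermediate form: keep a character iff its run index stays ≤ num_chars
def pvSpec2 (m : Int) : List Char → List Char → List Char
  | _, [] => []
  | p, c :: cs =>
    (if ((pvTrail c p : Int) + 1) ≤ m then [c] else []) ++ pvSpec2 m (p ++ [c]) cs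

lemma pvTrail_le (c : Char) (p : List Char) : pvTrail c p ≤ p.length := by
  have := (List.takeWhile_sublist (l := p.reverse) (fun x => x == c)).length_le
  simpa [pvTrail] using this

lemma pvTrail_concat (c d : Char) (p : List Char) :
    pvTrail c (p ++ [d]) = if d = c then pvTrail c p + 1 else 0 := by
  simp [pvTrail, List.takeWhile_cons]
  split_ifs with h <;> simp_all

lemma pvSameLoop_eq_all (doc : List Char) (i : Int) (ns : List Int) :
    pvSameLoop doc i ns
      = ns.all (fun n => PySem.List.pyGet? doc i == PySem.List.pyGet? doc (i - n)) := by
  induction ns with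
  | nil => rfl
  | cons n ns ih =>
    simp only [pvSameLoop, List.all_cons]
    by_cases h : PySem.List.pyGet? doc i == PySem.List.pyGet? doc (i - n) <;> simp [h, ih]

lemma pvTakeWhile_ge_iff (q : Char → Bool) (r : List Char) (m : Nat) (hm : m ≤ r.length) :
    m ≤ (r.takeWhile q).length ↔ ∀ j, (hj : j < m) → q (r[j]'(by omega)) := by
  induction r generalizing m with
  | nil =>
    have : m = 0 := by simpa using hm
    subst this; simp
  | cons x r ih =>
    cases m with
    | zero => simp
    | succ m =>
      by_cases hx : q x
      · simp only [List.takeWhile_cons, hx, if_pos]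
        rw [List.length_cons, Nat.succ_le_succ_iff, ih m (by simpa using hm)]
        constructor
        · intro h j hj
          cases j with
          | zero => simpa using hx
          | succ j => simpa using h j (by omega)
        · intro h j hj
          have := h (j + 1) (by omega)
          simpa using this
      · simp only [List.takeWhile_cons, hx, if_neg, Bool.false_eq_true, not_false_iff]
        simp only [List.length_nil, Nat.le_zero, Nat.succ_ne_zero, false_iff]
        intro h
        exact hx (by simpa using h 0 (by omega))

-- the crux: A's backward window test equals 'm ≤ trailing run of c in p'
lemma pvSame_eq (m : Int) (p cs : List Char) (c : Char) (him : m ≤ (p.length : Int)) :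
    pvSameLoop (p ++ c :: cs) (p.length : Int) (PySem.List.pyRange 1 (m + 1) 1)
      = decide (m ≤ (pvTrail c p : Int)) := by
  rw [pvSameLoop_eq_all]
  by_cases hm : m ≤ 0
  · rw [PySem.List.pyRange_one_eq_nil (by omega)]
    simp only [List.all_nil]
    have : m ≤ (pvTrail c p : Int) := le_trans hm (by positivity)
    simp [this]
  · rw [not_le] at hm
    have hget_i : PySem.List.pyGet? (p ++ c :: cs) (p.length : Int) = some c :=
      PySem.List.pyGet?_append_length p cs c
    have hget : ∀ j : Nat, (hj : j < m.toNat) →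
        PySem.List.pyGet? (p ++ c :: cs) ((p.length : Int) - ((j : Int) + 1))
          = some (p.reverse[j]'(by rw [List.length_reverse]; omega)) := by
      intro j hj
      have hk : (0:Int) ≤ (p.length : Int) - ((j:Int) + 1) := by omega
      have hklt : ((p.length : Int) - ((j:Int) + 1)).toNat < p.length := by omega
      rw [PySem.List.pyGet?_of_nonneg _ hk, List.getElem?_append_left hklt,
        List.getElem?_eq_getElem hklt]
      congr 1
      rw [List.getElem_reverse]
      congr 1
      omega
    by_cases hall : ∀ j, (hj : j < m.toNat) → (p.reverse[j]'(by
        rw [List.length_reverse]; omega)) = c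
    · have htr : m ≤ (pvTrail c p : Int) := by
        have : m.toNat ≤ (p.reverse.takeWhile (fun x => x == c)).length := by
          rw [pvTakeWhile_ge_iff _ _ _ (by rw [List.length_reverse]; omega)]
          intro j hj
          simp [hall j hj]
        unfold pvTrail
        omega
      simp only [htr, decide_true]
      rw [List.all_eq_true]
      intro n hn
      rw [PySem.List.mem_pyRange_one] at hn
      have hn1 : n = ((n.toNat - 1 : Nat) : Int) + 1 := by omega
      have hj : (n.toNat - 1) < m.toNat := by omega
      rw [hget_i, hn1, hget _ hj]
      simp [hall _ hj]
    · push Not at hall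
      obtain ⟨j, hj, hne⟩ := hall
      have htr : ¬ (m ≤ (pvTrail c p : Int)) := by
        intro hle
        have : m.toNat ≤ (p.reverse.takeWhile (fun x => x == c)).length := by
          unfold pvTrail at hle; omega
        rw [pvTakeWhile_ge_iff _ _ _ (by rw [List.length_reverse]; omega)] at this
        exact hne (by simpa using this j hj)
      simp only [htr, decide_false]
      rw [List.all_eq_false]
      refine ⟨(j : Int) + 1, ?_, ?_⟩
      · rw [PySem.List.mem_pyRange_one]; omega
      · rw [hget_i, hget _ hj]
        simp only [beq_iff_eq, Option.some.injEq]
        exact fun h => hne h.symm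

-- A's per-character decision equals the run-index test
lemma pvStepA_eq (m : Int) (p cs acc : List Char) (c : Char) :
    (if ((p.length : Int)) ≥ m then
       if pvSameLoop (p ++ c :: cs) (p.length : Int) (PySem.List.pyRange 1 (m + 1) 1)
       then acc else acc ++ [c]
     else acc ++ [c])
      = acc ++ (if ((pvTrail c p : Int) + 1) ≤ m then [c] else []) := by
  by_cases hge : ((p.length : Int)) ≥ m
  · rw [if_pos hge, pvSame_eq m p cs c hge]
    by_cases h : m ≤ (pvTrail c p : Int)
    · have h2 : ¬ ((pvTrail c p : Int) + 1 ≤ m) := by omega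
      simp [h, h2]
    · have h2 : (pvTrail c p : Int) + 1 ≤ m := by omega
      simp [h, h2]
  · have := pvTrail_le c p
    have h2 : (pvTrail c p : Int) + 1 ≤ m := by omega
    rw [if_neg hge, if_pos h2]

-- A's fold computes pvSpec2
lemma pvFoldA (m : Int) (cs : List Char) : ∀ (p acc : List Char),
    (PySem.List.enumerate cs (p.length : Int)).foldl (fun cleandoc ic =>
      if ic.1 ≥ m then
        if pvSameLoop (p ++ cs) ic.1 (PySem.List.pyRange 1 (m + 1) 1) then cleandoc
        else cleandoc ++ [ic.2]
      else cleandoc ++ [ic.2]) acc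
      = acc ++ pvSpec2 m p cs := by
  induction cs with
  | nil => intro p acc; simp [PySem.List.enumerate_nil, pvSpec2]
  | cons c cs ih =>
    intro p acc
    rw [PySem.List.enumerate_cons, List.foldl_cons]
    have hstep := pvStepA_eq m p cs acc c
    simp only [hstep]
    have hlen : (p.length : Int) + 1 = ((p ++ [c]).length : Int) := by
      simp
    have hfull : p ++ c :: cs = (p ++ [c]) ++ cs := by simp
    rw [hlen, hfull]
    rw [ih (p ++ [c]) (acc ++ if ((pvTrail c p : Int) + 1) ≤ m then [c] else [])]
    simp [pvSpec2]

lemma pvCleanA_eq (doc : List Char) (m : Int) : pvCleanA doc m = pvSpec2 m [] doc := by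
  unfold pvCleanA
  have := pvFoldA m doc [] []
  simpa using this

-- B's fold computes pvSpec2 (invariant: run = trailing run of the last char of p)
lemma pvFoldB (m : Int) (cs : List Char) : ∀ (p acc : List Char) (run : Int),
    (∀ d, p.getLast? = some d → run = (pvTrail d p : Int)) →
    (cs.foldl (pvStepB m) (acc, p.getLast?, run)).1 = acc ++ pvSpec2 m p cs := by
  induction cs with
  | nil => intro p acc run _; simp [pvSpec2]
  | cons c cs ih =>
    intro p acc run hinv
    rw [List.foldl_cons]
    have hrun' : (if some c == p.getLast? then run + 1 else 1) = (pvTrail c p : Int) + 1 := by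
      rcases List.eq_nil_or_concat' p with hp | ⟨q, d, hp⟩
      · subst hp; simp [pvTrail]
      · subst hp
        have hlast : (q ++ [d]).getLast? = some d := List.getLast?_concat
        have hrun := hinv d hlast
        by_cases hcd : c = d
        · subst hcd
          rw [hlast]
          simp only [beq_iff_eq]
          rw [hrun, pvTrail_concat]
          simp
        · rw [hlast]
          have hb : ¬ (some c == some d) = true := by simp [hcd]
          rw [if_neg hb, pvTrail_concat]
          have : ¬ d = c := fun h => hcd h.symm
          simp [this]
    have hstep : pvStepB m (acc, p.getLast?, run) c
        = ((if (pvTrail c p : Int) + 1 ≤ m then acc ++ [c] else acc),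
           (p ++ [c]).getLast?, (pvTrail c p : Int) + 1) := by
      simp only [pvStepB, hrun', List.getLast?_concat]
    rw [hstep]
    have hinv' : ∀ d, (p ++ [c]).getLast? = some d →
        ((pvTrail c p : Int) + 1) = (pvTrail d (p ++ [c]) : Int) := by
      intro d hd
      rw [List.getLast?_concat] at hd
      cases hd
      rw [pvTrail_concat]
      simp
    rw [ih (p ++ [c]) _ _ hinv']
    by_cases hk : (pvTrail c p : Int) + 1 ≤ m <;> simp [hk, pvSpec2]

lemma pvCleanB_eq (doc : List Char) (m : Int) : pvCleanB doc m = pvSpec2 m [] doc := by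
  unfold pvCleanB
  have := pvFoldB m doc [] [] 0 (by intro d hd; simp at hd)
  simpa using this

lemma pvClean_eq (doc : List Char) (m : Int) : pvCleanA doc m = pvCleanB doc m := by
  rw [pvCleanA_eq, pvCleanB_eq]

-- ===== VERDICT (by name: the statement is the Claim_ definition above) =====
theorem repeated_char_remover_spec : Claim_equal_repeated_char_remover := by
  intro docs num_chars _
  unfold Spec_repeated_char_remover repeated_char_remover repeated_char_remover_alt
  simp only [pvClean_eq]
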